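-- pv_equiv track=rewrite | github.com/ChiragSareen7/SHL | scripts/scrape_catalog.py | determine_test_type_code
-- ===== SOURCE A (Python) =====
-- def determine_test_type_code(keys: list[str]) -> str:
--     """Map descriptive keys to single-letter test type codes."""
--     mapping = {
--         "ability": "A",
--         "aptitude": "A",
--         "biodata": "B",
--         "situational": "B",
--         "competenc": "C",
--         "development": "D",
--         "360": "D",
--         "knowledge": "K",
--         "skills": "K",
--         "motivation": "M",
--         "personality": "P",
--         "behavior": "P",
--         "behaviour": "P",
--         "simulation": "S",
--     }
--     codes = set()
--     for key in keys:
--         key_l = key.lower()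
--         for keyword, code in mapping.items():
--             if keyword in key_l:
--                 codes.add(code)
--     return ",".join(sorted(codes)) if codes else "K"
-- ===== SOURCE B (Python) =====
-- def determine_test_type_code(keys: list[str]) -> str:
--     """Map descriptive keys to single-letter test type codes."""
--     groups = [
--         ("A", ("ability", "aptitude")),
--         ("B", ("biodata", "situational")),
--         ("C", ("competenc",)),
--         ("D", ("development", "360")),
--         ("K", ("knowledge", "skills")),
--         ("M", ("motivation",)),
--         ("P", ("personality", "behavior", "behaviour")),
--         ("S", ("simulation",)),
--     ]
--     lows = [k.lower() for k in keys]
--     out = ",".join(code for code, kws in groups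
--                    if any(w in kl for w in kws for kl in lows))
--     return out or "K"
-- ===== Notes on version B (the rewrite author's own statement) =====
-- stated objective: simpler
-- what changed: A loops over every key and scans the flat keyword dict inside, accumulating a set of codes that it sorts at the end; B pre-groups the keywords by code in an already alphabetical table and builds the answer in one comprehension (filter the 8 groups by an any() over the lowercased keys, join the surviving codes), so the set, the sort and the nested per-key dict scan disappear.
import Mathlib
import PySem

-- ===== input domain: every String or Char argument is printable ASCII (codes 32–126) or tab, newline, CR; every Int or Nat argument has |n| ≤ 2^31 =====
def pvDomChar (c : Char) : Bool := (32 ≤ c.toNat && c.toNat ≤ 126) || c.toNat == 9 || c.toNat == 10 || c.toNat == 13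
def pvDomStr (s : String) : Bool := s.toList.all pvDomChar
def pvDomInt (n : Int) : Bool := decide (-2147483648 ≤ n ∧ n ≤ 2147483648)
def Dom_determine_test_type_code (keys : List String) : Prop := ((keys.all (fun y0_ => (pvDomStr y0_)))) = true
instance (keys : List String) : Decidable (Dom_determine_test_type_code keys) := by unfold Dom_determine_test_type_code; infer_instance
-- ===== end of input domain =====

-- B pre-groups the keywords by code in an alphabetical table and builds the answer by one
-- filter-over-groups + join, removing A's set, sort and nested per-key dict scan — objective: simpler.

-- ===== PORT A =====
def dttcMapping : PySem.Dict String String :=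
  PySem.Dict.ofList [("ability","A"),("aptitude","A"),("biodata","B"),("situational","B"),
    ("competenc","C"),("development","D"),("360","D"),("knowledge","K"),("skills","K"),
    ("motivation","M"),("personality","P"),("behavior","P"),("behaviour","P"),("simulation","S")]

def determine_test_type_code (keys : List String) : String :=
  let codes : PySem.Set String :=
    keys.foldl (fun codes key =>
      let key_l := PySem.Str.lower key
      dttcMapping.items.foldl (fun codes kv =>
        if PySem.Str.isIn kv.1 key_l then PySem.Set.add codes kv.2 else codes) codes)
      PySem.Set.empty
  if codes = [] then "K" else PySem.Str.join "," (PySem.List.sorted codes (fun x => x))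

-- ===== PORT B =====
def dttcGroups : List (String × List String) :=
  [("A", ["ability", "aptitude"]),
   ("B", ["biodata", "situational"]),
   ("C", ["competenc"]),
   ("D", ["development", "360"]),
   ("K", ["knowledge", "skills"]),
   ("M", ["motivation"]),
   ("P", ["personality", "behavior", "behaviour"]),
   ("S", ["simulation"])]

def determine_test_type_code_alt (keys : List String) : String :=
  let lows := keys.map PySem.Str.lower
  let out := PySem.Str.join ","
    ((dttcGroups.filter (fun g => g.2.any (fun w => lows.any (fun kl => PySem.Str.isIn w kl)))).map (·.1))
  if out = "" then "K" else out

-- ===== PRECONDITION & SPEC =====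
def Spec_determine_test_type_code (keys : List String) (out : String) : Prop := out = determine_test_type_code_alt keys
instance (keys : List String) (out : String) : Decidable (Spec_determine_test_type_code keys out) := by unfold Spec_determine_test_type_code; infer_instance

-- ===== CLAIM (what is proved, stated in full; the proofs are below) =====
def Claim_equal_determine_test_type_code : Prop := ∀ (keys : List String), Dom_determine_test_type_code keys → Spec_determine_test_type_code keys (determine_test_type_code keys)

-- ===== LEMMAS AND PROOFS =====

-- pkw keys kw = "some key's lowercase form contains kw"
def pkw (keys : List String) (kw : String) : Bool :=
  keys.any (fun k => PySem.Str.isIn kw (PySem.Str.lower k))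

-- the list of hit codes as a function of the 8 per-code hit booleans
def Fcodes (a b c d k m p s : Bool) : List String :=
  (if a then ["A"] else []) ++ (if b then ["B"] else []) ++ (if c then ["C"] else []) ++
  (if d then ["D"] else []) ++ (if k then ["K"] else []) ++ (if m then ["M"] else []) ++
  (if p then ["P"] else []) ++ (if s then ["S"] else [])

-- A's set of codes
def Sval (keys : List String) : PySem.Set String :=
  keys.foldl (fun codes key =>
    dttcMapping.items.foldl (fun codes kv =>
      if PySem.Str.isIn kv.1 (PySem.Str.lower key) then PySem.Set.add codes kv.2 else codes) codes)
    PySem.Set.empty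

lemma A_eq (keys : List String) :
    determine_test_type_code keys =
      if Sval keys = [] then "K" else PySem.Str.join "," (PySem.List.sorted (Sval keys) (fun x => x)) := rfl

lemma core2 (a b c d k m p s : Bool) :
    (if Fcodes a b c d k m p s = [] then "K" else PySem.Str.join "," (Fcodes a b c d k m p s))
      = (if PySem.Str.join "," (Fcodes a b c d k m p s) = "" then "K"
         else PySem.Str.join "," (Fcodes a b c d k m p s)) := by
  revert a b c d k m p s; decide

lemma mem_inner (u : String) : ∀ (l : List (String × String)) (acc : PySem.Set String) (c : String),
    (c ∈ l.foldl (fun s kv => if PySem.Str.isIn kv.1 u then PySem.Set.add s kv.2 else s) acc) ↔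
      c ∈ acc ∨ ∃ kv ∈ l, kv.2 = c ∧ PySem.Str.isIn kv.1 u = true := by
  intro l
  induction l with
  | nil => intro acc c; simp
  | cons kv l ih =>
    intro acc c
    rw [List.foldl_cons, ih]
    by_cases h : PySem.Str.isIn kv.1 u = true
    · rw [if_pos h]
      simp only [PySem.Set.mem_add, List.exists_mem_cons_iff, h, and_true]
      constructor
      · rintro ((hc | hc) | hc)
        exacts [Or.inl hc, Or.inr (Or.inl hc.symm), Or.inr (Or.inr hc)]
      · rintro (hc | (hc | hc))
        exacts [Or.inl (Or.inl hc), Or.inl (Or.inr hc.symm), Or.inr hc]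
    · rw [if_neg h]
      simp only [List.exists_mem_cons_iff]
      have hn : ¬(kv.2 = c ∧ PySem.Str.isIn kv.1 u = true) := fun hh => h hh.2
      tauto

lemma nodup_inner (u : String) : ∀ (l : List (String × String)) (acc : PySem.Set String),
    acc.Nodup →
    (l.foldl (fun s kv => if PySem.Str.isIn kv.1 u then PySem.Set.add s kv.2 else s) acc).Nodup := by
  intro l
  induction l with
  | nil => intro acc h; simpa using h
  | cons kv l ih =>
    intro acc h
    rw [List.foldl_cons]
    apply ih
    by_cases hc : PySem.Str.isIn kv.1 u = true
    · rw [if_pos hc]; exact PySem.Set.nodup_add acc kv.2 h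
    · rw [if_neg hc]; exact h

lemma exists_or_cond (l : List (String × String)) (c : String) (f g : String → Bool) :
    ((∃ kv ∈ l, kv.2 = c ∧ f kv.1 = true) ∨ (∃ kv ∈ l, kv.2 = c ∧ g kv.1 = true)) ↔
      ∃ kv ∈ l, kv.2 = c ∧ (f kv.1 = true ∨ g kv.1 = true) := by
  constructor
  · rintro (⟨kv, h1, h2, h3⟩ | ⟨kv, h1, h2, h3⟩)
    exacts [⟨kv, h1, h2, Or.inl h3⟩, ⟨kv, h1, h2, Or.inr h3⟩]
  · rintro ⟨kv, h1, h2, (h3 | h3)⟩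
    exacts [Or.inl ⟨kv, h1, h2, h3⟩, Or.inr ⟨kv, h1, h2, h3⟩]

lemma mem_outer : ∀ (keys : List String) (acc : PySem.Set String) (c : String),
    (c ∈ keys.foldl (fun codes key =>
        dttcMapping.items.foldl (fun codes kv =>
          if PySem.Str.isIn kv.1 (PySem.Str.lower key) then PySem.Set.add codes kv.2 else codes) codes) acc) ↔
      c ∈ acc ∨ ∃ kv ∈ dttcMapping.items, kv.2 = c ∧ pkw keys kv.1 = true := by
  intro keys
  induction keys with
  | nil => intro acc c; simp [pkw]
  | cons k ks ih =>
    intro acc c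
    rw [List.foldl_cons, ih, mem_inner (PySem.Str.lower k) dttcMapping.items acc c]
    have hp : ∀ kw, (pkw (k :: ks) kw = true) ↔
        (PySem.Str.isIn kw (PySem.Str.lower k) = true ∨ pkw ks kw = true) := by
      intro kw; simp [pkw]
    simp only [hp]
    rw [or_assoc]
    exact or_congr_right
      (exists_or_cond dttcMapping.items c (fun kw => PySem.Str.isIn kw (PySem.Str.lower k)) (pkw ks))

lemma mem_Sval (keys : List String) (c : String) :
    c ∈ Sval keys ↔ ∃ kv ∈ dttcMapping.items, kv.2 = c ∧ pkw keys kv.1 = true := by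
  unfold Sval
  rw [mem_outer]
  simp [PySem.Set.empty]

lemma nodup_outer : ∀ (keys : List String) (acc : PySem.Set String), acc.Nodup →
    (keys.foldl (fun codes key =>
        dttcMapping.items.foldl (fun codes kv =>
          if PySem.Str.isIn kv.1 (PySem.Str.lower key) then PySem.Set.add codes kv.2 else codes) codes) acc).Nodup := by
  intro keys
  induction keys with
  | nil => intro acc h; simpa using h
  | cons k ks ih =>
    intro acc h
    rw [List.foldl_cons]
    exact ih _ (nodup_inner (PySem.Str.lower k) dttcMapping.items acc h)

lemma nodup_Sval (keys : List String) : (Sval keys).Nodup := by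
  unfold Sval
  exact nodup_outer keys PySem.Set.empty List.nodup_nil

lemma filter_cons_append (p : String → Bool) (a : String) (l : List String) :
    List.filter p (a :: l) = (if p a = true then [a] else []) ++ List.filter p l := by
  by_cases h : p a = true <;> simp [h]

lemma filter_map_cons {α β : Type} (p : α → Bool) (f : α → β) (a : α) (l : List α) :
    ((a :: l).filter p).map f = (if p a then [f a] else []) ++ (l.filter p).map f := by
  by_cases h : p a = true <;> simp [h]

lemma hit_iff (keys : List String) (c : String) (b : Bool)
    (h : (∃ kv ∈ dttcMapping.items, kv.2 = c ∧ pkw keys kv.1 = true) ↔ b = true) :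
    decide (c ∈ Sval keys) = b := by
  have h2 : (c ∈ Sval keys) ↔ b = true := (mem_Sval keys c).trans h
  cases hb : b <;> simp [h2, hb]

-- B's hit-code list equals Fcodes at the eight per-code booleans
lemma hits_eq (keys : List String) :
    ((dttcGroups.filter (fun g => g.2.any (fun w =>
        (keys.map PySem.Str.lower).any (fun kl => PySem.Str.isIn w kl)))).map (·.1)) =
      Fcodes (pkw keys "ability" || pkw keys "aptitude")
        (pkw keys "biodata" || pkw keys "situational")
        (pkw keys "competenc")
        (pkw keys "development" || pkw keys "360")
        (pkw keys "knowledge" || pkw keys "skills")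
        (pkw keys "motivation")
        (pkw keys "personality" || pkw keys "behavior" || pkw keys "behaviour")
        (pkw keys "simulation") := by
  simp only [dttcGroups, filter_map_cons, List.filter_nil, List.map_nil, List.append_nil,
    List.any_cons, List.any_nil, List.any_map, Function.comp_def, Bool.or_false, Fcodes, pkw,
    List.append_assoc, Bool.or_assoc]
  rfl

-- ===== VERDICT (by name: the statement is the Claim_ definition above) =====
theorem determine_test_type_code_spec : Claim_equal_determine_test_type_code := by
  intro keys _
  show determine_test_type_code keys = determine_test_type_code_alt keys
  have hitems : dttcMapping.items =
      [("ability","A"),("aptitude","A"),("biodata","B"),("situational","B"),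
       ("competenc","C"),("development","D"),("360","D"),("knowledge","K"),("skills","K"),
       ("motivation","M"),("personality","P"),("behavior","P"),("behaviour","P"),("simulation","S")] := rfl
  have eA : decide (("A" : String) ∈ Sval keys) = (pkw keys "ability" || pkw keys "aptitude") :=
    hit_iff keys "A" _ (by rw [hitems]; simp)
  have eB : decide (("B" : String) ∈ Sval keys) = (pkw keys "biodata" || pkw keys "situational") :=
    hit_iff keys "B" _ (by rw [hitems]; simp)
  have eC : decide (("C" : String) ∈ Sval keys) = pkw keys "competenc" :=
    hit_iff keys "C" _ (by rw [hitems]; simp)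
  have eD : decide (("D" : String) ∈ Sval keys) = (pkw keys "development" || pkw keys "360") :=
    hit_iff keys "D" _ (by rw [hitems]; simp)
  have eK : decide (("K" : String) ∈ Sval keys) = (pkw keys "knowledge" || pkw keys "skills") :=
    hit_iff keys "K" _ (by rw [hitems]; simp)
  have eM : decide (("M" : String) ∈ Sval keys) = pkw keys "motivation" :=
    hit_iff keys "M" _ (by rw [hitems]; simp)
  have eP : decide (("P" : String) ∈ Sval keys) = (pkw keys "personality" || pkw keys "behavior" || pkw keys "behaviour") :=
    hit_iff keys "P" _ (by rw [hitems]; simp [or_assoc])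
  have eS : decide (("S" : String) ∈ Sval keys) = pkw keys "simulation" :=
    hit_iff keys "S" _ (by rw [hitems]; simp)
  have hsub : ∀ a ∈ Sval keys, a ∈ (["A","B","C","D","K","M","P","S"] : List String) := by
    intro a ha
    rw [mem_Sval, hitems] at ha
    obtain ⟨kv, hkv, h2, -⟩ := ha
    subst h2
    have hall : ∀ kv ∈ ([("ability","A"),("aptitude","A"),("biodata","B"),("situational","B"),
       ("competenc","C"),("development","D"),("360","D"),("knowledge","K"),("skills","K"),
       ("motivation","M"),("personality","P"),("behavior","P"),("behaviour","P"),("simulation","S")] :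
        List (String × String)), kv.2 ∈ (["A","B","C","D","K","M","P","S"] : List String) := by decide
    exact hall kv hkv
  have hfilnodup : (List.filter (fun c => decide (c ∈ Sval keys)) ["A","B","C","D","K","M","P","S"]).Nodup :=
    List.Nodup.filter _ (by decide)
  have hsort : PySem.List.sorted (Sval keys) (fun x => x) =
      List.filter (fun c => decide (c ∈ Sval keys)) ["A","B","C","D","K","M","P","S"] := by
    apply PySem.List.sorted_eq_of_perm_of_pairwise_lt
    · rw [List.perm_ext_iff_of_nodup hfilnodup (nodup_Sval keys)]
      intro a
      simp only [List.mem_filter, decide_eq_true_eq]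
      exact ⟨fun h => h.2, fun h => ⟨hsub a h, h⟩⟩
    · exact List.Pairwise.filter _ (by simp [List.pairwise_cons]; decide)
  have hfil : List.filter (fun c => decide (c ∈ Sval keys)) ["A","B","C","D","K","M","P","S"] =
      Fcodes (pkw keys "ability" || pkw keys "aptitude")
        (pkw keys "biodata" || pkw keys "situational")
        (pkw keys "competenc")
        (pkw keys "development" || pkw keys "360")
        (pkw keys "knowledge" || pkw keys "skills")
        (pkw keys "motivation")
        (pkw keys "personality" || pkw keys "behavior" || pkw keys "behaviour")
        (pkw keys "simulation") := by
    simp only [filter_cons_append, List.filter_nil, List.append_nil, Fcodes]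
    rw [eA, eB, eC, eD, eK, eM, eP, eS]
    simp [List.append_assoc]
  have hchain := hsort.trans hfil
  have hguard : (Sval keys = []) ↔
      (Fcodes (pkw keys "ability" || pkw keys "aptitude")
        (pkw keys "biodata" || pkw keys "situational")
        (pkw keys "competenc")
        (pkw keys "development" || pkw keys "360")
        (pkw keys "knowledge" || pkw keys "skills")
        (pkw keys "motivation")
        (pkw keys "personality" || pkw keys "behavior" || pkw keys "behaviour")
        (pkw keys "simulation") = []) := by
    rw [← hchain]
    exact (PySem.List.sorted_eq_nil_iff (Sval keys) (fun x => x) false).symm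
  have halt : determine_test_type_code_alt keys =
      (if PySem.Str.join "," (Fcodes (pkw keys "ability" || pkw keys "aptitude")
          (pkw keys "biodata" || pkw keys "situational") (pkw keys "competenc")
          (pkw keys "development" || pkw keys "360") (pkw keys "knowledge" || pkw keys "skills")
          (pkw keys "motivation") (pkw keys "personality" || pkw keys "behavior" || pkw keys "behaviour")
          (pkw keys "simulation")) = "" then "K"
       else PySem.Str.join "," (Fcodes (pkw keys "ability" || pkw keys "aptitude")
          (pkw keys "biodata" || pkw keys "situational") (pkw keys "competenc")
          (pkw keys "development" || pkw keys "360") (pkw keys "knowledge" || pkw keys "skills")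
          (pkw keys "motivation") (pkw keys "personality" || pkw keys "behavior" || pkw keys "behaviour")
          (pkw keys "simulation"))) := by
    simp only [determine_test_type_code_alt]
    rw [hits_eq]
  rw [A_eq, halt, ← core2]
  by_cases hS : Sval keys = []
  · rw [if_pos hS, if_pos (hguard.mp hS)]
  · rw [if_neg hS, if_neg (fun h => hS (hguard.mpr h)), hchain]
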